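-- pv_equiv track=rewrite | github.com/2015hdwl-Claw/taiwan-venues-new | archive/oneoff_scripts/auto_sync_system.py | generate_commit_message
-- ===== SOURCE A (Python) =====
-- from typing import Dict, List, Optional
--
-- def generate_commit_message(changes: List[Dict]) -> str:
--     """生成 commit message"""
--     if not changes:
--         return "chore: 自動資料更新"
--
--     # 統計變更類型
--     venue_updates = sum(1 for c in changes if c.get('type') == 'venue_update')
--     photo_updates = sum(1 for c in changes if c.get('type') == 'photo_update')
--     corrections = sum(1 for c in changes if c.get('type') == 'correction')
--
--     parts = []
--     if venue_updates > 0: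
--         parts.append(f"更新 {venue_updates} 個場地資料")
--     if photo_updates > 0:
--         parts.append(f"更新 {photo_updates} 張照片")
--     if corrections > 0:
--         parts.append(f"修正 {corrections} 處錯誤")
--
--     if parts:
--         return f"chore: {', '.join(parts)}"
--     else:
--         return "chore: 自動資料更新"
-- ===== SOURCE B (Python) =====
-- def generate_commit_message(changes):
--     """生成 commit message"""
--     if not changes:
--         return "chore: 自動資料更新"
--
--     # one pass: count table keyed by change type
--     counts = {}
--     for c in changes:
--         t = c.get('type')
--         counts[t] = counts.get(t, 0) + 1
--
--     parts = []
--     for key, fmt in (('venue_update', "更新 {} 個場地資料"),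
--                      ('photo_update', "更新 {} 張照片"),
--                      ('correction', "修正 {} 處錯誤")):
--         n = counts.get(key, 0)
--         if n > 0:
--             parts.append(fmt.format(n))
--
--     if parts:
--         return "chore: " + ", ".join(parts)
--     return "chore: 自動資料更新"
-- ===== Notes on version B (the rewrite author's own statement) =====
-- stated objective: simpler
-- what changed: B replaces A's three separate filtered scans over changes with one pass that builds a type->count table, then emits the parts by a data-driven loop over (key, format) pairs reading the table.
import Mathlib
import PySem

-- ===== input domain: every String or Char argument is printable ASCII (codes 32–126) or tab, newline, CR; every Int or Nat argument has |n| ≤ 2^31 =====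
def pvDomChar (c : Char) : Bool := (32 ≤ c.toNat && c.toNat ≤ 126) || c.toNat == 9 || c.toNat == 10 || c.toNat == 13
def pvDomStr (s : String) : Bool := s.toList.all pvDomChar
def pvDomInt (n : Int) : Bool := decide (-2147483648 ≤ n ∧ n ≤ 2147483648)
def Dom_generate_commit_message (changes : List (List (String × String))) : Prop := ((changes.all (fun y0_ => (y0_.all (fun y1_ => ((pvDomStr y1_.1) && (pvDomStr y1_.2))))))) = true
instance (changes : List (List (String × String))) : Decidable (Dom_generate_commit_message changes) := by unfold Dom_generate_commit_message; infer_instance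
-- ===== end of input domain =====

-- B builds one type->count table in a single pass and emits from it, instead of A's three filtered scans (objective: simpler).

-- shared helper: Python's c.get('type') on an association-list dict (first match)
def getType (c : List (String × String)) : Option String :=
  (c.find? (fun p => p.1 == "type")).map (·.2)

-- ===== PORT A =====
def generate_commit_message (changes : List (List (String × String))) : String :=
  if changes = [] then "chore: 自動資料更新"
  else
    let venue_updates : Int := changes.foldl (fun acc c => if getType c == some "venue_update" then acc + 1 else acc) 0
    let photo_updates : Int := changes.foldl (fun acc c => if getType c == some "photo_update" then acc + 1 else acc) 0
    let corrections : Int := changes.foldl (fun acc c => if getType c == some "correction" then acc + 1 else acc) 0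
    let parts : List String := []
    let parts := if venue_updates > 0 then parts ++ ["更新 " ++ PySem.Int.toStr venue_updates ++ " 個場地資料"] else parts
    let parts := if photo_updates > 0 then parts ++ ["更新 " ++ PySem.Int.toStr photo_updates ++ " 張照片"] else parts
    let parts := if corrections > 0 then parts ++ ["修正 " ++ PySem.Int.toStr corrections ++ " 處錯誤"] else parts
    if parts ≠ [] then "chore: " ++ PySem.Str.join ", " parts else "chore: 自動資料更新"

-- ===== PORT B =====
def generate_commit_message_alt (changes : List (List (String × String))) : String :=
  if changes = [] then "chore: 自動資料更新"
  else
    let counts : PySem.Dict (Option String) Int :=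
      changes.foldl (fun d c => d.insert (getType c) (d.getD (getType c) 0 + 1)) PySem.Dict.empty
    let table : List (String × (Int → String)) :=
      [("venue_update", fun n => "更新 " ++ PySem.Int.toStr n ++ " 個場地資料"),
       ("photo_update", fun n => "更新 " ++ PySem.Int.toStr n ++ " 張照片"),
       ("correction",  fun n => "修正 " ++ PySem.Int.toStr n ++ " 處錯誤")]
    let parts : List String :=
      table.foldl (fun acc kf =>
        let n := counts.getD (some kf.1) 0
        if n > 0 then acc ++ [kf.2 n] else acc) []
    if parts ≠ [] then "chore: " ++ PySem.Str.join ", " parts else "chore: 自動資料更新"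

-- ===== PRECONDITION & SPEC =====
def Spec_generate_commit_message (changes : List (List (String × String))) (out : String) : Prop := out = generate_commit_message_alt changes
instance (changes : List (List (String × String))) (out : String) : Decidable (Spec_generate_commit_message changes out) := by unfold Spec_generate_commit_message; infer_instance

-- ===== CLAIM (what is proved, stated in full; the proofs are below) =====
def Claim_equal_generate_commit_message : Prop := ∀ (changes : List (List (String × String))), Dom_generate_commit_message changes → Spec_generate_commit_message changes (generate_commit_message changes)

-- ===== LEMMAS AND PROOFS =====

-- A's conditional-count foldl over changes is the count of v among the mapped types
theorem foldl_count_type (changes : List (List (String × String))) (v : Option String) (a : Int) :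
    changes.foldl (fun acc c => if getType c == v then acc + 1 else acc) a
      = a + ((changes.map getType).count v : Int) := by
  induction changes generalizing a with
  | nil => simp
  | cons c cs ih =>
    simp only [List.foldl_cons, List.map_cons, ih]
    by_cases h : getType c = v
    · simp [h]; ring
    · have : (getType c == v) = false := by simp [h]
      simp [this, h]

-- B's counting pass, read at a key, is the same count
theorem counts_getD (changes : List (List (String × String))) (v : Option String) :
    (changes.foldl (fun d c => d.insert (getType c) (d.getD (getType c) 0 + 1))
        (PySem.Dict.empty : PySem.Dict (Option String) Int)).getD v 0
      = ((changes.map getType).count v : Int) := by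
  have h : changes.foldl (fun d c => d.insert (getType c) (d.getD (getType c) 0 + 1))
      (PySem.Dict.empty : PySem.Dict (Option String) Int)
      = (changes.map getType).foldl (fun d x => d.insert x (d.getD x 0 + 1)) PySem.Dict.empty := by
    rw [List.foldl_map]
  rw [h, PySem.Dict.getD_foldl_insert_add_one]
  simp

-- ===== VERDICT (by name: the statement is the Claim_ definition above) =====
theorem generate_commit_message_spec : Claim_equal_generate_commit_message := by
  intro changes _
  unfold Spec_generate_commit_message generate_commit_message generate_commit_message_alt
  by_cases hnil : changes = []
  · simp [hnil]
  · simp only [if_neg hnil, List.foldl_cons, List.foldl_nil]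
    rw [foldl_count_type changes (some "venue_update") 0,
        foldl_count_type changes (some "photo_update") 0,
        foldl_count_type changes (some "correction") 0,
        counts_getD changes (some "venue_update"),
        counts_getD changes (some "photo_update"),
        counts_getD changes (some "correction")]
    simp
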